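-- pv_equiv track=rewrite | github.com/Az-har/monologue-asr | src/utils/text_cleaner.py | remove_repeated_phrases
-- ===== SOURCE A (Python) =====
-- def remove_repeated_phrases(text):
--     """
--     Removes repeated short phrases Whisper sometimes produces.
--     """
--
--     words = text.split()
--     cleaned = []
--
--     for word in words:
--
--         if len(cleaned) > 3 and word == cleaned[-1]:
--             continue
--
--         cleaned.append(word)
--
--     return " ".join(cleaned)
-- ===== SOURCE B (Python) =====
-- def remove_repeated_phrases(text):
--     """
--     Removes repeated short phrases Whisper sometimes produces.
--     """
--     words = text.split()
--     tail = words[3:]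
--     kept = tail[:1] + [w for p, w in zip(tail, tail[1:]) if w != p]
--     return " ".join(words[:3] + kept)
-- ===== Notes on version B (the rewrite author's own statement) =====
-- stated objective: idiomatic
-- what changed: Replaced the guarded accumulator loop (append unless last-kept equals current once length > 3) by a verbatim prefix words[:3] plus a pairwise zip comprehension that collapses consecutive duplicate runs in words[3:].
import Mathlib
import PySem

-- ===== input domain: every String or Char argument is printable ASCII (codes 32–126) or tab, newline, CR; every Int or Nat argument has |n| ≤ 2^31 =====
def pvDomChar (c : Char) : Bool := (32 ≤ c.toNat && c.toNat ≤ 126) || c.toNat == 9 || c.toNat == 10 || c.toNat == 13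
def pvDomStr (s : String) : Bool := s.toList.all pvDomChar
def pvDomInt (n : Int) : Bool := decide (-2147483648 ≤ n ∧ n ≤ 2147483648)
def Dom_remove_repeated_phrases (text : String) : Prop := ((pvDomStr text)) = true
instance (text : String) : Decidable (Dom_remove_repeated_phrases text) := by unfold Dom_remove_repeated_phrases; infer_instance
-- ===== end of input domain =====

-- B replaces A's guarded accumulator loop by prefix words[:3] + a pairwise zip comprehension over words[3:] (idiomatic decomposition, same cost).

-- ===== PORT A =====
-- the loop body: append word unless cleaned already has > 3 items and word equals cleaned[-1]
def pvStepA (cleaned : List String) (word : String) : List String :=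
  if cleaned.length > 3 ∧ PySem.List.pyGet? cleaned (-1) = some word then cleaned
  else cleaned ++ [word]

def remove_repeated_phrases (text : String) : String :=
  let words := PySem.Str.split₀ text
  let cleaned := words.foldl pvStepA []
  PySem.Str.join " " cleaned

-- ===== PORT B =====
def remove_repeated_phrases_alt (text : String) : String :=
  let words := PySem.Str.split₀ text
  let tail := PySem.List.slice words (some 3) none
  let kept := PySem.List.slice tail none (some 1) ++
    ((tail.zip tail.tail).filter (fun pw => pw.2 != pw.1)).map Prod.snd
  PySem.Str.join " " (PySem.List.slice words none (some 3) ++ kept)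

-- ===== PRECONDITION & SPEC =====
def Spec_remove_repeated_phrases (text : String) (out : String) : Prop := out = remove_repeated_phrases_alt text
instance (text : String) (out : String) : Decidable (Spec_remove_repeated_phrases text out) := by unfold Spec_remove_repeated_phrases; infer_instance

-- ===== CLAIM (what is proved, stated in full; the proofs are below) =====
def Claim_equal_remove_repeated_phrases : Prop := ∀ (text : String), Dom_remove_repeated_phrases text → Spec_remove_repeated_phrases text (remove_repeated_phrases text)

-- ===== LEMMAS AND PROOFS =====

-- run-collapse relative to a previous word (proof-only helper)
def pvDD (prev : String) : List String → List String
  | [] => []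
  | w :: t => if w = prev then pvDD prev t else w :: pvDD w t

theorem pvZipRun (t : List String) : ∀ (x : String),
    (((x :: t).zip t).filter (fun pw => pw.2 != pw.1)).map Prod.snd = pvDD x t := by
  induction t with
  | nil => intro x; simp [pvDD]
  | cons w t ih =>
    intro x
    simp only [List.zip_cons_cons, List.filter_cons, pvDD]
    by_cases h : w = x
    · subst h; simpa using ih w
    · simp [h, ih w]

theorem pvPhase2 (rest : List String) : ∀ (acc : List String) (lastv : String),
    acc.getLast? = some lastv → 3 < acc.length →
    List.foldl pvStepA acc rest = acc ++ pvDD lastv rest := by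
  induction rest with
  | nil => intro acc lastv _ _; simp [pvDD]
  | cons w rest ih =>
    intro acc lastv hlast hlen
    simp only [List.foldl_cons, pvDD]
    by_cases h : w = lastv
    · subst h
      have : pvStepA acc w = acc := by
        simp [pvStepA, PySem.List.pyGet?_neg_one, hlast, hlen]
      rw [this, if_pos rfl]
      exact ih acc w hlast hlen
    · have hstep : pvStepA acc w = acc ++ [w] := by
        simp only [pvStepA, PySem.List.pyGet?_neg_one, hlast]
        rw [if_neg]
        rintro ⟨-, h2⟩
        exact h (Option.some.inj h2).symm
      rw [hstep, if_neg h]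
      have hl : (acc ++ [w]).getLast? = some w := by simp
      have hlen' : 3 < (acc ++ [w]).length := by simp; omega
      rw [ih (acc ++ [w]) w hl hlen']
      simp

theorem pvListEq (ws : List String) :
    ws.foldl pvStepA [] =
      PySem.List.slice ws none (some 3) ++
        (PySem.List.slice (PySem.List.slice ws (some 3) none) none (some 1) ++
          (((PySem.List.slice ws (some 3) none).zip (PySem.List.slice ws (some 3) none).tail).filter
            (fun pw => pw.2 != pw.1)).map Prod.snd) := by
  match ws with
  | [] => decide
  | [a] => rfl
  | [a, b] => rfl
  | [a, b, c] => rfl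
  | a :: b :: c :: d :: rest =>
    have h1 : List.foldl pvStepA [] (a :: b :: c :: d :: rest)
        = List.foldl pvStepA [a, b, c, d] rest := by
      simp [pvStepA]
    rw [h1, pvPhase2 rest [a, b, c, d] d (by simp) (by simp)]
    have h3 : PySem.List.slice (a :: b :: c :: d :: rest) none (some 3) = [a, b, c] := by
      rw [show ((3 : Int)) = ((3 : Nat) : Int) by norm_num, PySem.List.slice_to_natCast]; rfl
    have h4 : PySem.List.slice (a :: b :: c :: d :: rest) (some 3) none = d :: rest := by
      rw [show ((3 : Int)) = ((3 : Nat) : Int) by norm_num, PySem.List.slice_from_natCast]; rfl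
    rw [h3, h4]
    have h5 : PySem.List.slice (d :: rest) none (some 1) = [d] := by
      rw [show ((1 : Int)) = ((1 : Nat) : Int) by norm_num, PySem.List.slice_to_natCast]
      simp
    rw [h5]
    simp only [List.tail_cons, pvZipRun rest d]
    simp

-- ===== VERDICT (by name: the statement is the Claim_ definition above) =====
theorem remove_repeated_phrases_spec : Claim_equal_remove_repeated_phrases := by
  intro text _
  exact congrArg (PySem.Str.join " ") (pvListEq (PySem.Str.split₀ text))
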